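-- pv_equiv track=rewrite | github.com/NicholasJohansan/MiniProjects | Games/chess.py | get_all_possible_tiles
-- ===== SOURCE A (Python) =====
-- def get_all_possible_tiles(current_tile):
-- 	possible_moves = {
-- 		"n": [],
-- 		"s": [],
-- 		"w": [],
-- 		"e": []
-- 	}
-- 	for key in possible_moves.keys():
-- 		func = {
-- 			"n": lambda row, col: (row-1, col),
-- 			"s": lambda row, col: (row+1, col),
-- 			"w": lambda row, col: (row, col-1),
-- 			"e": lambda row, col: (row, col+1)
-- 		}.get(key)
-- 		row, col = current_tile
-- 		while not (row <= 0 or row >= 7 or col <= 0 or col >= 7):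
-- 			row, col = func(row, col)
-- 			possible_moves[key].append((row, col))
-- 	return possible_moves
-- ===== SOURCE B (Python) =====
-- def get_all_possible_tiles(current_tile):
--     row, col = current_tile
--     inside = 0 < row < 7 and 0 < col < 7
--     return {
--         "n": [(r, col) for r in range(row - 1, -1, -1)] if inside else [],
--         "s": [(r, col) for r in range(row + 1, 8)] if inside else [],
--         "w": [(row, c) for c in range(col - 1, -1, -1)] if inside else [],
--         "e": [(row, c) for c in range(col + 1, 8)] if inside else [],
--     }
-- ===== Notes on version B (the rewrite author's own statement) =====
-- stated objective: simpler
-- what changed: Replaces the per-key dispatch dict and four runs of the stepping while-loop with a single entry guard and four closed-form range comprehensions that build each ray directly.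
import Mathlib
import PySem

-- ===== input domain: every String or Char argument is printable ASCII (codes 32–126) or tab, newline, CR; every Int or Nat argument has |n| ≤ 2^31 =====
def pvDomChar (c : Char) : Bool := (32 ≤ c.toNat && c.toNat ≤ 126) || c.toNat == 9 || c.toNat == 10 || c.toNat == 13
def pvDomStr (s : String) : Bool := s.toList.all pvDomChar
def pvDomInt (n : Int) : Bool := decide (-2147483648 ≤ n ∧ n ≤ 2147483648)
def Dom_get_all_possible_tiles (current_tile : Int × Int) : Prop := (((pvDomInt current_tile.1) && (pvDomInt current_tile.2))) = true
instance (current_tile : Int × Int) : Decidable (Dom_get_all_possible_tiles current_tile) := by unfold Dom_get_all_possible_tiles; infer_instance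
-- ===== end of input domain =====

-- B replaces A's per-direction while-loop stepping with one entry guard plus closed-form range comprehensions; objective: simpler.

-- ===== PORT A =====
-- A's while-loop, for one direction: guard on the CURRENT tile, step with f, append the new tile.
-- The fuel argument only makes the loop total: when the guard holds, 0 < row < 7 and 0 < col < 7,
-- so the loop runs at most 6 iterations; fuel 8 is never exhausted.
def pvLoop (f : Int × Int → Int × Int) : Nat → Int → Int → List (Int × Int) → List (Int × Int)
  | 0, _, _, acc => acc
  | fuel + 1, row, col, acc =>
    if row ≤ 0 ∨ row ≥ 7 ∨ col ≤ 0 ∨ col ≥ 7 then acc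
    else
      let rc := f (row, col)
      pvLoop f fuel rc.1 rc.2 (acc ++ [rc])

def get_all_possible_tiles (current_tile : Int × Int) : List (String × List (Int × Int)) :=
  let row := current_tile.1
  let col := current_tile.2
  [ ("n", pvLoop (fun p => (p.1 - 1, p.2)) 8 row col []),
    ("s", pvLoop (fun p => (p.1 + 1, p.2)) 8 row col []),
    ("w", pvLoop (fun p => (p.1, p.2 - 1)) 8 row col []),
    ("e", pvLoop (fun p => (p.1, p.2 + 1)) 8 row col []) ]

-- ===== PORT B =====
def get_all_possible_tiles_alt (current_tile : Int × Int) : List (String × List (Int × Int)) :=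
  let row := current_tile.1
  let col := current_tile.2
  let inside : Bool := decide (0 < row ∧ row < 7 ∧ 0 < col ∧ col < 7)
  [ ("n", if inside then (PySem.List.pyRange (row - 1) (-1) (-1)).map (fun r => (r, col)) else []),
    ("s", if inside then (PySem.List.pyRange (row + 1) 8 1).map (fun r => (r, col)) else []),
    ("w", if inside then (PySem.List.pyRange (col - 1) (-1) (-1)).map (fun c => (row, c)) else []),
    ("e", if inside then (PySem.List.pyRange (col + 1) 8 1).map (fun c => (row, c)) else []) ]

-- ===== PRECONDITION & SPEC =====
def Spec_get_all_possible_tiles (current_tile : Int × Int) (out : List (String × List (Int × Int))) : Prop := out = get_all_possible_tiles_alt current_tile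
instance (current_tile : Int × Int) (out : List (String × List (Int × Int))) : Decidable (Spec_get_all_possible_tiles current_tile out) := by unfold Spec_get_all_possible_tiles; infer_instance

-- ===== CLAIM (what is proved, stated in full; the proofs are below) =====
def Claim_equal_get_all_possible_tiles : Prop := ∀ (current_tile : Int × Int), Dom_get_all_possible_tiles current_tile → Spec_get_all_possible_tiles current_tile (get_all_possible_tiles current_tile)

-- ===== LEMMAS AND PROOFS =====

theorem pvLoop_stop (f : Int × Int → Int × Int) (fuel : Nat) (row col : Int) (acc : List (Int × Int))
    (h : row ≤ 0 ∨ row ≥ 7 ∨ col ≤ 0 ∨ col ≥ 7) :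
    pvLoop f fuel row col acc = acc := by
  cases fuel with
  | zero => rfl
  | succ n => simp [pvLoop, h]

-- ===== VERDICT (by name: the statement is the Claim_ definition above) =====
theorem get_all_possible_tiles_spec : Claim_equal_get_all_possible_tiles := by
  unfold Claim_equal_get_all_possible_tiles
  rintro ⟨row, col⟩ _
  unfold Spec_get_all_possible_tiles get_all_possible_tiles get_all_possible_tiles_alt
  by_cases hin : 0 < row ∧ row < 7 ∧ 0 < col ∧ col < 7
  · obtain ⟨h1, h2, h3, h4⟩ := hin
    interval_cases row <;> interval_cases col <;> decide
  · have hout : row ≤ 0 ∨ row ≥ 7 ∨ col ≤ 0 ∨ col ≥ 7 := by omega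
    simp [pvLoop_stop _ _ _ _ _ hout, hin]
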